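-- pv_equiv track=rewrite | github.com/ameloa/streamorder | src/.ipynb_checkpoints/shardmap-checkpoint.py | shardmap_evaluate
-- ===== SOURCE A (Python) =====
-- def shardmap_evaluate(shardMap, numNodes, neighborsMap):
--     internal = 0
--     external = 0
--     for u in range(numNodes):
--         for v in neighborsMap[u]:
--             if (shardMap[u] == shardMap[v]):
--                 internal += 1
--             else:
--                 external += 1
--     return (internal, external)
-- ===== SOURCE B (Python) =====
-- def shardmap_evaluate(shardMap, numNodes, neighborsMap):
--     internal = 0
--     external = 0
--     for u in range(numNodes):
--         ns = neighborsMap[u]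
--         if not ns:
--             continue
--         counts = {}
--         for v in ns:
--             s = shardMap[v]
--             counts[s] = counts.get(s, 0) + 1
--         same = counts.get(shardMap[u], 0)
--         internal += same
--         external += len(ns) - same
--     return (internal, external)
-- ===== Notes on version B (the rewrite author's own statement) =====
-- stated objective: alternative
-- what changed: A compares shardMap[u] with shardMap[v] once per edge; B builds, for each node, a hash multiset (dict counter) of its neighbors' shard labels and reads off the internal count with a single lookup of shardMap[u], so the per-edge shard comparison disappears.
import Mathlib
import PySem

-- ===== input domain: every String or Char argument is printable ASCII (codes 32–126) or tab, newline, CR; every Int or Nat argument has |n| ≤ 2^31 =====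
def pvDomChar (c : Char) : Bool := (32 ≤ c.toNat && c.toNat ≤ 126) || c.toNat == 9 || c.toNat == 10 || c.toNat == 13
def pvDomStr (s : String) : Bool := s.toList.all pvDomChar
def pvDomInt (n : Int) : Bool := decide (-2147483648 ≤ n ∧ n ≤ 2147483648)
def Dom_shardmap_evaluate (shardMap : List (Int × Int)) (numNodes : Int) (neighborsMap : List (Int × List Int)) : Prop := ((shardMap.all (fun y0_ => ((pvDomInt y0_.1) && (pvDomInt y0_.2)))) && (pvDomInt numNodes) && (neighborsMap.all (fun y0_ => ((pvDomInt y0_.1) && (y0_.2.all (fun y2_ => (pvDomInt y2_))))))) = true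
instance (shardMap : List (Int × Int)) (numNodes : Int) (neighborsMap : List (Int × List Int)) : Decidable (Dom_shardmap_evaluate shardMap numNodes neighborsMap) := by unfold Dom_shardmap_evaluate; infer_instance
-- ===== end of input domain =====

-- A compares the two shard labels per edge; B instead builds a per-node dict counter of the
-- neighbors' shard labels and reads the internal count with one lookup (objective: alternative).

-- ===== PORT A =====
-- nested pass over range(numNodes); dict lookups via PySem.Dict (Pre_ guarantees every lookup hits)
def shardmap_evaluate (shardMap : List (Int × Int)) (numNodes : Int) (neighborsMap : List (Int × List Int)) : Int × Int :=
  (PySem.List.pyRange 0 numNodes 1).foldl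
    (fun (st : Int × Int) u =>
      ((PySem.Dict.mk neighborsMap).getD u []).foldl
        (fun (st : Int × Int) v =>
          if (PySem.Dict.mk shardMap).getD u 0 = (PySem.Dict.mk shardMap).getD v 0 then
            (st.1 + 1, st.2)
          else
            (st.1, st.2 + 1)) st)
    (0, 0)

-- ===== PORT B =====
def shardmap_evaluate_alt (shardMap : List (Int × Int)) (numNodes : Int) (neighborsMap : List (Int × List Int)) : Int × Int :=
  (PySem.List.pyRange 0 numNodes 1).foldl
    (fun (st : Int × Int) u =>
      let ns := (PySem.Dict.mk neighborsMap).getD u []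
      if ns = [] then st
      else
        let counts :=
          ns.foldl (fun (d : PySem.Dict Int Int) v =>
            let s := (PySem.Dict.mk shardMap).getD v 0
            d.insert s (d.getD s 0 + 1)) (PySem.Dict.mk [])
        let same := counts.getD ((PySem.Dict.mk shardMap).getD u 0) 0
        (st.1 + same, st.2 + (ns.length : Int) - same))
    (0, 0)

-- ===== PRECONDITION & SPEC =====
-- Pre_ excludes exactly the inputs where Python raises KeyError: some u in range(numNodes) missing
-- from neighborsMap, or a shardMap lookup for u or one of its neighbors missing.
-- the first conjunct is redundant semantically (numNodes entries cannot all have keys among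
-- fewer pairs) but keeps the quantifier range small so the predicate evaluates
def Pre_shardmap_evaluate (shardMap : List (Int × Int)) (numNodes : Int) (neighborsMap : List (Int × List Int)) : Prop :=
  numNodes ≤ (neighborsMap.length : Int) ∧
  ∀ u ∈ PySem.List.pyRange 0 numNodes 1,
    ((PySem.Dict.mk neighborsMap).get? u).isSome ∧
    ∀ v ∈ (PySem.Dict.mk neighborsMap).getD u [],
      ((PySem.Dict.mk shardMap).get? u).isSome ∧ ((PySem.Dict.mk shardMap).get? v).isSome
instance (shardMap : List (Int × Int)) (numNodes : Int) (neighborsMap : List (Int × List Int)) : Decidable (Pre_shardmap_evaluate shardMap numNodes neighborsMap) := by unfold Pre_shardmap_evaluate; infer_instance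

def pvWitness_shardmap_evaluate : (List (Int × Int)) × Int × (List (Int × List Int)) :=
  ([(0, 0), (1, 0), (2, 1)], 3, [(0, [1, 2]), (1, [0]), (2, [0, 2])])

def Spec_shardmap_evaluate (shardMap : List (Int × Int)) (numNodes : Int) (neighborsMap : List (Int × List Int)) (out : Int × Int) : Prop := out = shardmap_evaluate_alt shardMap numNodes neighborsMap
instance (shardMap : List (Int × Int)) (numNodes : Int) (neighborsMap : List (Int × List Int)) (out : Int × Int) : Decidable (Spec_shardmap_evaluate shardMap numNodes neighborsMap out) := by unfold Spec_shardmap_evaluate; infer_instance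

-- ===== CLAIM =====
def Claim_equal_shardmap_evaluate : Prop := ∀ (shardMap : List (Int × Int)) (numNodes : Int) (neighborsMap : List (Int × List Int)), Dom_shardmap_evaluate shardMap numNodes neighborsMap → Pre_shardmap_evaluate shardMap numNodes neighborsMap → Spec_shardmap_evaluate shardMap numNodes neighborsMap (shardmap_evaluate shardMap numNodes neighborsMap)

-- ===== LEMMAS AND PROOFS =====

-- A's inner loop with its two counters, expressed through countP and length
lemma inner_pair (p : Int → Prop) [DecidablePred p] (ns : List Int) (st : Int × Int) :
    ns.foldl (fun (st : Int × Int) v => if p v then (st.1 + 1, st.2) else (st.1, st.2 + 1)) st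
      = (st.1 + (ns.countP (fun v => decide (p v)) : Int),
         st.2 + (ns.length : Int) - (ns.countP (fun v => decide (p v)) : Int)) := by
  induction ns generalizing st with
  | nil => simp
  | cons v ns ih =>
    simp only [List.foldl_cons, List.countP_cons, List.length_cons]
    by_cases h : p v <;> simp only [h, if_pos, if_neg, decide_true, decide_false, not_false_iff] <;>
      rw [ih] <;> push_cast <;> rw [Prod.mk.injEq] <;> exact ⟨by ring, by ring⟩

-- B's counter lookup equals the countP A's inner pass produces
lemma counter_lookup (sh : Int → Int) (ns : List Int) (u : Int) :
    (ns.foldl (fun (d : PySem.Dict Int Int) v => d.insert (sh v) (d.getD (sh v) 0 + 1))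
        (PySem.Dict.mk [])).getD (sh u) 0
      = (ns.countP (fun v => decide (sh u = sh v)) : Int) := by
  have h1 : ns.foldl (fun (d : PySem.Dict Int Int) v => d.insert (sh v) (d.getD (sh v) 0 + 1))
      (PySem.Dict.mk []) = (ns.map sh).foldl (fun d x => d.insert x (d.getD x 0 + 1))
      PySem.Dict.empty := by
    rw [List.foldl_map]; rfl
  rw [h1, PySem.Dict.foldl_insert_getD_add_one_eq_counter, PySem.Dict.getD_counter]
  congr 1
  rw [List.count_eq_countP, List.countP_map]
  apply List.countP_congr
  intro v _
  simp only [Function.comp_apply]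
  simp only [beq_iff_eq, decide_eq_true_eq]
  exact eq_comm

-- ===== VERDICT =====
theorem shardmap_evaluate_spec : Claim_equal_shardmap_evaluate := by
  intro shardMap numNodes neighborsMap _ _
  unfold Spec_shardmap_evaluate shardmap_evaluate shardmap_evaluate_alt
  apply PySem.List.foldl_congr_mem
  intro st u _
  rw [inner_pair (fun v => (PySem.Dict.mk shardMap).getD u 0 = (PySem.Dict.mk shardMap).getD v 0)
       ((PySem.Dict.mk neighborsMap).getD u []) st]
  simp only [counter_lookup (fun w => (PySem.Dict.mk shardMap).getD w 0)]
  by_cases h : (PySem.Dict.mk neighborsMap).getD u [] = []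
  · simp [h]
  · rw [if_neg h]
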